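-- pv_equiv track=rewrite | github.com/dilermandojefferson/TAcademy-Lista1 | exercicio11/src/application/domain.py | verificacao
-- ===== SOURCE A (Python) =====
-- def verificacao(entrada):
--
--     entrada_salva=[]
--
--     for i in entrada:
--
--         if (i =="(") and (")" in entrada_salva):
--             entrada_salva.remove(")")
--
--         elif  i =="(":
--             entrada_salva.append("(")
--
--
--         if (i ==")") and ("(" in entrada_salva):
--             entrada_salva.remove("(")
--
--         elif  i ==")":
--             entrada_salva.append(")")
-- #_______________________________________
--
--         if (i =="[") and ("]" in entrada_salva):
--             entrada_salva.remove("]")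
--
--         elif  i =="[":
--             entrada_salva.append("[")
--
--
--         if (i =="]") and ("[" in entrada_salva):
--             entrada_salva.remove("[")
--
--         elif  i =="]":
--             entrada_salva.append("]")
-- #_______________________________________
--
--         if (i =="{") and ("}" in entrada_salva):
--             entrada_salva.remove("}")
--
--         elif  i =="{":
--             entrada_salva.append("{")
--
--
--         if (i =="}") and ("{" in entrada_salva):
--             entrada_salva.remove("{")
--
--         elif  i =="}":
--             entrada_salva.append("}")
--
--     return entrada_salva
-- ===== SOURCE B (Python) =====
-- def verificacao(entrada):
--     # One pass with O(1) per-pair counters and FIFO index queues, then emit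
--     # survivors in position order (A rescans its list on every bracket).
--     KIND = {'(': (0, 1), ')': (0, -1),
--             '[': (1, 1), ']': (1, -1),
--             '{': (2, 1), '}': (2, -1)}
--     bal = [0, 0, 0]          # signed open-minus-close count per pair
--     pushes = [[], [], []]    # (position, symbol) append events per pair
--     pops = [0, 0, 0]         # number of cancelled (earliest) append events
--     for pos, ch in enumerate(entrada):
--         if ch in KIND:
--             k, s = KIND[ch]
--             if bal[k] * s < 0:      # opposite symbol stored: cancel earliest
--                 pops[k] += 1
--             else:                   # same side (or empty): store this one
--                 pushes[k].append((pos, ch))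
--             bal[k] += s
--     survivors = pushes[0][pops[0]:] + pushes[1][pops[1]:] + pushes[2][pops[2]:]
--     survivors.sort(key=lambda t: t[0])
--     return [ch for _, ch in survivors]
-- ===== Notes on version B (the rewrite author's own statement) =====
-- stated objective: faster
-- what changed: A rescans and mutates one shared list per bracket (membership test + remove, each O(n)); B does a single pass keeping an O(1) signed counter and a FIFO queue of append positions per bracket pair, then emits the surviving entries in position order.
import Mathlib
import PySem

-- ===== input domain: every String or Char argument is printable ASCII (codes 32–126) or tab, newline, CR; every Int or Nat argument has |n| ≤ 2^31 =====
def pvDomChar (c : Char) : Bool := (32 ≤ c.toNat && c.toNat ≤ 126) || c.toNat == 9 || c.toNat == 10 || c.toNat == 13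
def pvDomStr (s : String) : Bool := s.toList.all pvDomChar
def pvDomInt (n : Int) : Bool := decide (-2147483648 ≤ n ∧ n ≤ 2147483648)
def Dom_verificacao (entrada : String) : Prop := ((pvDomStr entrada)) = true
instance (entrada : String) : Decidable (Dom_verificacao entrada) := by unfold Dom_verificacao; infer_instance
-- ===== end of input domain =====

-- B replaces A's list-rescanning loop (membership test + remove on a growing list
-- per bracket) by one pass with O(1) per-pair counters and FIFO queues of append
-- positions, emitting the surviving entries in position order at the end.

-- ===== PORT A =====
-- one iteration of A's loop body (the six if/elif units, in A's order)
def stepA (salva : List String) (c : Char) : List String :=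
  let s1 := if c = '(' then
      (if ")" ∈ salva then (PySem.List.remove? salva ")").getD salva else salva ++ ["("])
    else salva
  let s2 := if c = ')' then
      (if "(" ∈ s1 then (PySem.List.remove? s1 "(").getD s1 else s1 ++ [")"])
    else s1
  let s3 := if c = '[' then
      (if "]" ∈ s2 then (PySem.List.remove? s2 "]").getD s2 else s2 ++ ["["])
    else s2
  let s4 := if c = ']' then
      (if "[" ∈ s3 then (PySem.List.remove? s3 "[").getD s3 else s3 ++ ["]"])
    else s3
  let s5 := if c = '{' then
      (if "}" ∈ s4 then (PySem.List.remove? s4 "}").getD s4 else s4 ++ ["{"])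
    else s4
  if c = '}' then
      (if "{" ∈ s5 then (PySem.List.remove? s5 "{").getD s5 else s5 ++ ["}"])
    else s5

def verificacao (entrada : String) : List String :=
  entrada.toList.foldl stepA []

-- ===== PORT B =====
-- per-pair state: signed balance, list of (position, symbol) append events,
-- count of cancelled (earliest) append events  (bal[k] / pushes[k] / pops[k] in Source B)
structure PvPair where
  b : Int
  q : List (Int × String)
  p : Nat
deriving Repr, DecidableEq

-- the loop body of Source B for the pair of an incoming bracket of sign s
def pvUpd (pr : PvPair) (pos s : Int) (sym : String) : PvPair :=
  if pr.b * s < 0 then { pr with p := pr.p + 1, b := pr.b + s }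
  else { pr with q := pr.q ++ [(pos, sym)], b := pr.b + s }

-- Source B's KIND dispatch
def stepB (st : PvPair × PvPair × PvPair) (pos : Int) (c : Char) :
    PvPair × PvPair × PvPair :=
  if c = '(' then ⟨pvUpd st.1 pos 1 "(", st.2.1, st.2.2⟩
  else if c = ')' then ⟨pvUpd st.1 pos (-1) ")", st.2.1, st.2.2⟩
  else if c = '[' then ⟨st.1, pvUpd st.2.1 pos 1 "[", st.2.2⟩
  else if c = ']' then ⟨st.1, pvUpd st.2.1 pos (-1) "]", st.2.2⟩
  else if c = '{' then ⟨st.1, st.2.1, pvUpd st.2.2 pos 1 "{"⟩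
  else if c = '}' then ⟨st.1, st.2.1, pvUpd st.2.2 pos (-1) "}"⟩
  else st

def verificacao_alt (entrada : String) : List String :=
  let st := (PySem.List.enumerate entrada.toList 0).foldl
      (fun s pc => stepB s pc.1 pc.2) (⟨0, [], 0⟩, ⟨0, [], 0⟩, ⟨0, [], 0⟩)
  let survivors := st.1.q.drop st.1.p ++ st.2.1.q.drop st.2.1.p ++ st.2.2.q.drop st.2.2.p
  (PySem.List.sorted survivors (fun t => t.1) false).map (fun t => t.2)

-- ===== PRECONDITION & SPEC =====
def Spec_verificacao (entrada : String) (out : List String) : Prop := out = verificacao_alt entrada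
instance (entrada : String) (out : List String) : Decidable (Spec_verificacao entrada out) := by unfold Spec_verificacao; infer_instance

-- ===== CLAIM (what is proved, stated in full; the proofs are below) =====
def Claim_equal_verificacao : Prop := ∀ (entrada : String), Dom_verificacao entrada → Spec_verificacao entrada (verificacao entrada)

-- ===== LEMMAS AND PROOFS =====

-- surviving (uncancelled) append events of one pair
def tl (pr : PvPair) : List (Int × String) := pr.q.drop pr.p

def tails (st : PvPair × PvPair × PvPair) : List (Int × String) :=
  tl st.1 ++ tl st.2.1 ++ tl st.2.2

-- what A's list looks like: B's survivors, sorted by position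
def rend (l : List (Int × String)) : List String :=
  (PySem.List.sorted l (fun t => t.1) false).map (fun t => t.2)

def PairInv (n : Int) (o c : String) (pr : PvPair) : Prop :=
  pr.p ≤ pr.q.length ∧
  (tl pr).Pairwise (fun x y => x.1 < y.1) ∧
  (∀ e ∈ tl pr, e.1 < n) ∧
  (tl pr).length = pr.b.natAbs ∧
  (∀ e ∈ tl pr, e.2 = if 0 < pr.b then o else c)

def StInv (n : Int) (st : PvPair × PvPair × PvPair) : Prop :=
  PairInv n "(" ")" st.1 ∧ PairInv n "[" "]" st.2.1 ∧ PairInv n "{" "}" st.2.2 ∧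
  ((tails st).map Prod.fst).Nodup

-- ---- generic list/sorted lemmas ----

theorem pairwise_lt_of_le_nodup {M : List (Int × String)}
    (h : M.Pairwise (fun x y => x.1 ≤ y.1)) (hn : (M.map Prod.fst).Nodup) :
    M.Pairwise (fun x y => x.1 < y.1) := by
  have hne : M.Pairwise (fun x y => x.1 ≠ y.1) := List.pairwise_map.1 hn
  exact (h.and hne).imp (fun hp => lt_of_le_of_ne hp.1 hp.2)

theorem sorted_key_lt (l : List (Int × String)) (hn : (l.map Prod.fst).Nodup) :
    (PySem.List.sorted l (fun t => t.1) false).Pairwise (fun x y => x.1 < y.1) := by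
  apply pairwise_lt_of_le_nodup (PySem.List.sorted_pairwise ..)
  exact (((PySem.List.sorted_perm l (fun t => t.1) false).map Prod.fst).nodup_iff).2 hn

theorem sorted_congr {l l' : List (Int × String)} (h : l.Perm l')
    (hn : (l'.map Prod.fst).Nodup) :
    PySem.List.sorted l (fun t => t.1) false = PySem.List.sorted l' (fun t => t.1) false := by
  apply PySem.List.sorted_eq_of_perm_of_pairwise_lt
  · exact (PySem.List.sorted_perm l' (fun t => t.1) false).trans h.symm
  · exact sorted_key_lt l' hn

theorem rend_congr {l l' : List (Int × String)} (h : l.Perm l')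
    (hn : (l'.map Prod.fst).Nodup) : rend l = rend l' := by
  unfold rend; rw [sorted_congr h hn]

theorem sorted_snoc (l : List (Int × String)) (n : Int) (x : String)
    (hb : ∀ e ∈ l, e.1 < n) (hn : (l.map Prod.fst).Nodup) :
    PySem.List.sorted (l ++ [(n, x)]) (fun t => t.1) false
      = PySem.List.sorted l (fun t => t.1) false ++ [(n, x)] := by
  apply PySem.List.sorted_eq_of_perm_of_pairwise_lt
  · exact (PySem.List.sorted_perm l (fun t => t.1) false).append_right [(n, x)]
  · rw [List.pairwise_append]
    refine ⟨sorted_key_lt l hn, List.pairwise_singleton _ _, ?_⟩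
    intro a ha b hb'
    simp only [List.mem_singleton] at hb'
    subst hb'
    exact hb a ((PySem.List.mem_sorted _ _ _ _).1 ha)

theorem sorted_erase (l : List (Int × String)) (a : Int × String)
    (hn : (l.map Prod.fst).Nodup) :
    PySem.List.sorted (l.erase a) (fun t => t.1) false
      = (PySem.List.sorted l (fun t => t.1) false).erase a := by
  apply PySem.List.sorted_eq_of_perm_of_pairwise_lt
  · exact (PySem.List.sorted_perm l (fun t => t.1) false).erase a
  · exact List.Pairwise.sublist List.erase_sublist (sorted_key_lt l hn)

theorem remove?_map_snd (M : List (Int × String)) (a : Int × String) (v : String)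
    (hlt : M.Pairwise (fun x y => x.1 < y.1)) (ha : a ∈ M) (hav : a.2 = v)
    (hmin : ∀ e ∈ M, e.2 = v → a.1 ≤ e.1) :
    PySem.List.remove? (M.map (fun t => t.2)) v = some ((M.erase a).map (fun t => t.2)) := by
  induction M with
  | nil => cases ha
  | cons x M' ih =>
    by_cases hx : x = a
    · subst hx
      rw [List.map_cons, hav, PySem.List.remove?_cons_self, List.erase_cons_head]
    · have haM' : a ∈ M' := by
        rcases List.mem_cons.1 ha with h | h
        · exact absurd h.symm hx
        · exact h
      have hxv : x.2 ≠ v := by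
        intro hv
        have h1 : x.1 < a.1 := (List.pairwise_cons.1 hlt).1 a haM'
        have h2 : a.1 ≤ x.1 := hmin x (List.mem_cons_self ..) hv
        omega
      have her : (x :: M').erase a = x :: M'.erase a :=
        List.erase_cons_tail (by simp [hx])
      rw [List.map_cons, PySem.List.remove?_cons_of_ne _ hxv,
        ih (List.pairwise_cons.1 hlt).2 haM'
          (fun e he hv => hmin e (List.mem_cons_of_mem _ he) hv), her, List.map_cons]
      rfl

theorem mem_rend {l : List (Int × String)} {v : String} :
    v ∈ rend l ↔ ∃ e ∈ l, e.2 = v := by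
  simp [rend, List.mem_map, PySem.List.mem_sorted]

-- ---- master step lemmas on a slot view (t ++ rest) ----

theorem master_push (t rest : List (Int × String)) (n : Int) (x : String)
    (hk : ((t ++ rest).map Prod.fst).Nodup) (hb : ∀ e ∈ t ++ rest, e.1 < n) :
    rend ((t ++ [(n, x)]) ++ rest) = rend (t ++ rest) ++ [x] := by
  have hperm : ((t ++ [(n, x)]) ++ rest).Perm ((t ++ rest) ++ [(n, x)]) := by
    refine List.perm_iff_count.2 ?_
    intro e; simp [List.count_append, List.count_cons]; try omega
  have hn2 : (((t ++ rest) ++ [(n, x)]).map Prod.fst).Nodup := by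
    rw [List.map_append, List.nodup_append]
    refine ⟨hk, by simp, ?_⟩
    intro p hp q hq
    simp only [List.map_cons, List.map_nil, List.mem_singleton] at hq
    subst hq
    rcases List.mem_map.1 hp with ⟨e, he, rfl⟩
    have hlt := hb e he
    omega
  unfold rend
  rw [sorted_congr hperm hn2, sorted_snoc _ _ _ hb hk, List.map_append]
  rfl

theorem master_pop (t' rest : List (Int × String)) (a : Int × String) (v : String)
    (hpt : (a :: t').Pairwise (fun x y => x.1 < y.1)) (hav : a.2 = v)
    (_htv : ∀ e ∈ t', e.2 = v) (huv : ∀ e ∈ rest, e.2 ≠ v)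
    (hk : (((a :: t') ++ rest).map Prod.fst).Nodup) :
    PySem.List.remove? (rend ((a :: t') ++ rest)) v = some (rend (t' ++ rest)) := by
  set l := (a :: t') ++ rest with hl
  have hMlt : (PySem.List.sorted l (fun t => t.1) false).Pairwise (fun x y => x.1 < y.1) :=
    sorted_key_lt l hk
  have haM : a ∈ PySem.List.sorted l (fun t => t.1) false := by
    rw [PySem.List.mem_sorted]; exact List.mem_append_left _ (List.mem_cons_self ..)
  have hmin : ∀ e ∈ PySem.List.sorted l (fun t => t.1) false, e.2 = v → a.1 ≤ e.1 := by
    intro e he hv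
    have hel : e ∈ l := (PySem.List.mem_sorted _ _ _ _).1 he
    rcases List.mem_append.1 hel with hm | hm
    · rcases List.mem_cons.1 hm with hm2 | hm2
      · exact le_of_eq (by rw [hm2])
      · exact le_of_lt ((List.pairwise_cons.1 hpt).1 e hm2)
    · exact absurd hv (huv e hm)
  have hrem := remove?_map_snd (PySem.List.sorted l (fun t => t.1) false) a v hMlt haM hav hmin
  have herase : (PySem.List.sorted l (fun t => t.1) false).erase a
      = PySem.List.sorted (t' ++ rest) (fun t => t.1) false := by
    rw [← sorted_erase l a hk]
    congr 1
    show ((a :: (t' ++ rest)).erase a) = t' ++ rest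
    exact List.erase_cons_head a _
  unfold rend
  rw [hrem, herase]

-- ---- slot permutations ----

theorem permAt1 {α : Type} [DecidableEq α] (x0 x1 x2 : List α) : (x0 ++ x1 ++ x2).Perm (x1 ++ (x0 ++ x2)) := by
  refine List.perm_iff_count.2 ?_
  intro e; simp [List.count_append]; omega

theorem permAt2 {α : Type} [DecidableEq α] (x0 x1 x2 : List α) : (x0 ++ x1 ++ x2).Perm (x2 ++ (x0 ++ x1)) := by
  refine List.perm_iff_count.2 ?_
  intro e; simp [List.count_append]; omega

-- ---- pair-level step lemmas ----

theorem tl_snoc (pr : PvPair) (h : pr.p ≤ pr.q.length) (pos : Int) (sym : String) :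
    (pr.q ++ [(pos, sym)]).drop pr.p = tl pr ++ [(pos, sym)] := by
  rw [List.drop_append, Nat.sub_eq_zero_of_le h]
  rfl

theorem pairinv_mono {n : Int} {o c : String} {pr : PvPair} (h : PairInv n o c pr) :
    PairInv (n + 1) o c pr := by
  obtain ⟨h1, h2, h3, h4, h5⟩ := h
  exact ⟨h1, h2, fun e he => lt_trans (h3 e he) (by omega), h4, h5⟩

theorem snd_mem_pair {n : Int} {o c : String} {pr : PvPair} (h : PairInv n o c pr) :
    ∀ e ∈ tl pr, e.2 = o ∨ e.2 = c := by
  intro e he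
  have := h.2.2.2.2 e he
  by_cases hb : 0 < pr.b
  · left; rw [this, if_pos hb]
  · right; rw [this, if_neg hb]

-- incoming bracket of sign s pushes when the stored side is not opposite
theorem pair_push {n : Int} {o c : String} {pr : PvPair} (h : PairInv n o c pr)
    (s : Int) (sym : String)
    (hs : (s = 1 ∧ sym = o ∧ 0 ≤ pr.b) ∨ (s = -1 ∧ sym = c ∧ pr.b ≤ 0)) :
    tl (pvUpd pr n s sym) = tl pr ++ [(n, sym)] ∧ PairInv (n + 1) o c (pvUpd pr n s sym) := by
  obtain ⟨h1, h2, h3, h4, h5⟩ := h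
  have hcond : ¬ pr.b * s < 0 := by
    rcases hs with ⟨rfl, _, hb⟩ | ⟨rfl, _, hb⟩ <;> nlinarith
  have hupd : pvUpd pr n s sym = { pr with q := pr.q ++ [(n, sym)], b := pr.b + s } := by
    rw [pvUpd, if_neg hcond]
  have htl : tl (pvUpd pr n s sym) = tl pr ++ [(n, sym)] := by
    rw [hupd]; exact tl_snoc pr h1 n sym
  refine ⟨htl, ?_, ?_, ?_, ?_, ?_⟩
  · rw [hupd]; simpa using Nat.le_trans h1 (by simp)
  · rw [htl, List.pairwise_append]
    exact ⟨h2, List.pairwise_singleton _ _, by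
      intro a ha b hb'
      simp only [List.mem_singleton] at hb'
      subst hb'
      exact h3 a ha⟩
  · rw [htl]
    intro e he
    rcases List.mem_append.1 he with hm | hm
    · exact lt_trans (h3 e hm) (by omega)
    · simp only [List.mem_singleton] at hm; subst hm; omega
  · rw [htl, List.length_append, h4, hupd]
    rcases hs with ⟨rfl, _, hb⟩ | ⟨rfl, _, hb⟩ <;> simp <;> omega
  · rw [htl]
    intro e he
    rcases List.mem_append.1 he with hm | hm
    · have := h5 e hm
      rcases hs with ⟨rfl, rfl, hb⟩ | ⟨rfl, rfl, hb⟩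
      · rw [hupd]; simp only []
        have hb1 : 0 < pr.b + 1 := by omega
        rw [if_pos hb1]
        by_cases hb0 : 0 < pr.b
        · rw [this, if_pos hb0]
        · exfalso
          have : pr.b = 0 := by omega
          have hlen : (tl pr).length = 0 := by rw [h4, this]; rfl
          rw [List.length_eq_zero_iff] at hlen
          rw [hlen] at hm; cases hm
      · rw [hupd]; simp only []
        have hb1 : ¬ 0 < pr.b + -1 := by omega
        rw [if_neg hb1]
        by_cases hb0 : 0 < pr.b
        · omega
        · rw [this, if_neg hb0]
    · simp only [List.mem_singleton] at hm; subst hm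
      rcases hs with ⟨rfl, rfl, hb⟩ | ⟨rfl, rfl, hb⟩
      · rw [hupd]; simp only []
        rw [if_pos (by omega : (0:Int) < pr.b + 1)]
      · rw [hupd]; simp only []
        rw [if_neg (by omega : ¬ (0:Int) < pr.b + -1)]

-- incoming bracket whose opposite is stored: pop the earliest stored event
theorem pair_pop {n : Int} {o c : String} {pr : PvPair} (h : PairInv n o c pr)
    (s : Int) (sym stored : String)
    (hs : (s = 1 ∧ pr.b < 0 ∧ stored = c) ∨ (s = -1 ∧ 0 < pr.b ∧ stored = o)) :
    ∃ a t', tl pr = a :: t' ∧ a.2 = stored ∧ (∀ e ∈ t', e.2 = stored) ∧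
      tl (pvUpd pr n s sym) = t' ∧ PairInv (n + 1) o c (pvUpd pr n s sym) := by
  obtain ⟨h1, h2, h3, h4, h5⟩ := h
  have hne : tl pr ≠ [] := by
    intro hnil
    have : (tl pr).length = 0 := by rw [hnil]; rfl
    rw [h4] at this
    rcases hs with ⟨_, hb, _⟩ | ⟨_, hb, _⟩ <;> omega
  obtain ⟨a, t', hcons⟩ := List.exists_cons_of_ne_nil hne
  have hsym : ∀ e ∈ tl pr, e.2 = stored := by
    intro e he
    have := h5 e he
    rcases hs with ⟨_, hb, rfl⟩ | ⟨_, hb, rfl⟩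
    · rw [this, if_neg (by omega)]
    · rw [this, if_pos hb]
  have hcond : pr.b * s < 0 := by
    rcases hs with ⟨rfl, hb, _⟩ | ⟨rfl, hb, _⟩ <;> nlinarith
  have hupd : pvUpd pr n s sym = { pr with p := pr.p + 1, b := pr.b + s } := by
    rw [pvUpd, if_pos hcond]
  have hlen : pr.p < pr.q.length := by
    have : (tl pr).length = pr.q.length - pr.p := by
      rw [tl, List.length_drop]
    rw [hcons] at this
    simp at this
    omega
  have htl' : tl (pvUpd pr n s sym) = t' := by
    rw [hupd]
    show pr.q.drop (pr.p + 1) = t'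
    have : pr.q.drop (pr.p + 1) = (pr.q.drop pr.p).drop 1 := by
      rw [List.drop_drop]
    rw [this]
    show (tl pr).drop 1 = t'
    rw [hcons]; rfl
  refine ⟨a, t', hcons, hsym a (by rw [hcons]; exact List.mem_cons_self ..),
    fun e he => hsym e (by rw [hcons]; exact List.mem_cons_of_mem _ he), htl', ?_, ?_, ?_, ?_, ?_⟩
  · rw [hupd]; simpa using hlen
  · rw [htl']
    exact (List.pairwise_cons.1 (hcons ▸ h2)).2
  · rw [htl']
    intro e he
    exact lt_trans (h3 e (by rw [hcons]; exact List.mem_cons_of_mem _ he)) (by omega)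
  · rw [htl', hupd]
    have : (tl pr).length = t'.length + 1 := by rw [hcons]; rfl
    rw [h4] at this
    rcases hs with ⟨rfl, hb, _⟩ | ⟨rfl, hb, _⟩ <;> simp <;> omega
  · rw [htl']
    intro e he
    have := h5 e (by rw [hcons]; exact List.mem_cons_of_mem _ he)
    rcases hs with ⟨rfl, hb, _⟩ | ⟨rfl, hb, _⟩
    · rw [hupd]; simp only []
      rw [if_neg (by omega : ¬ (0:Int) < pr.b + 1)]
      rw [this, if_neg (by omega)]
    · rw [hupd]; simp only []
      by_cases hb1 : 0 < pr.b + -1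
      · rw [if_pos hb1, this, if_pos hb]
      · rw [if_neg hb1]
        exfalso
        -- b - 1 ≤ 0 and 0 < b means b = 1, so t' is empty
        have hb2 : pr.b = 1 := by omega
        have hlen1 : (tl pr).length = 1 := by rw [h4, hb2]; rfl
        rw [hcons] at hlen1
        simp at hlen1
        rw [hlen1] at he; cases he


-- keys of a snoc stay Nodup when the new key is fresh (larger than all)
theorem keys_snoc_nodup (l : List (Int × String)) (n : Int) (x : String)
    (hk : (l.map Prod.fst).Nodup) (hb : ∀ e ∈ l, e.1 < n) :
    ((l ++ [(n, x)]).map Prod.fst).Nodup := by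
  rw [List.map_append, List.nodup_append]
  refine ⟨hk, by simp, ?_⟩
  intro p hp q hq
  simp only [List.map_cons, List.map_nil, List.mem_singleton] at hq
  subst hq
  rcases List.mem_map.1 hp with ⟨e, he, rfl⟩
  have hlt := hb e he
  omega

-- one slot of stepB against the matching if/elif unit of A's loop body
theorem slot_step (o c : String) (pr : PvPair) (rest : List (Int × String)) (n : Int)
    (s : Int) (insym opp : String)
    (hinv : PairInv n o c pr) (hoc : o ≠ c)
    (hso : (s = 1 ∧ insym = o ∧ opp = c) ∨ (s = -1 ∧ insym = c ∧ opp = o))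
    (hrest : ∀ e ∈ rest, e.2 ≠ o ∧ e.2 ≠ c)
    (hk : ((tl pr ++ rest).map Prod.fst).Nodup)
    (hbr : ∀ e ∈ rest, e.1 < n) :
    (if opp ∈ rend (tl pr ++ rest) then
        (PySem.List.remove? (rend (tl pr ++ rest)) opp).getD (rend (tl pr ++ rest))
      else rend (tl pr ++ rest) ++ [insym])
      = rend (tl (pvUpd pr n s insym) ++ rest)
    ∧ PairInv (n + 1) o c (pvUpd pr n s insym)
    ∧ ((tl (pvUpd pr n s insym) ++ rest).map Prod.fst).Nodup := by
  have hpop : (s = 1 ∧ pr.b < 0) ∨ (s = -1 ∧ 0 < pr.b) ∨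
      ((s = 1 ∧ insym = o ∧ 0 ≤ pr.b) ∨ (s = -1 ∧ insym = c ∧ pr.b ≤ 0)) := by
    rcases hso with ⟨rfl, rfl, rfl⟩ | ⟨rfl, rfl, rfl⟩
    · by_cases hb : pr.b < 0
      · exact Or.inl ⟨rfl, hb⟩
      · exact Or.inr (Or.inr (Or.inl ⟨rfl, rfl, by omega⟩))
    · by_cases hb : 0 < pr.b
      · exact Or.inr (Or.inl ⟨rfl, hb⟩)
      · exact Or.inr (Or.inr (Or.inr ⟨rfl, rfl, by omega⟩))
  rcases hpop with ⟨hs1, hblt⟩ | ⟨hs1, hblt⟩ | hcase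
  · -- POP with an incoming opening bracket: the closer is stored
    subst hs1
    have hstored : opp = c := by
      rcases hso with ⟨ha_, hb_, h⟩ | ⟨ha_, hb_, h⟩
      · exact h
      · exact absurd ha_ (by norm_num)
    subst hstored
    obtain ⟨a, t', hcons, ha2, ht2, htl', hpinv⟩ :=
      pair_pop hinv 1 insym opp (Or.inl ⟨rfl, hblt, rfl⟩)
    have hmem : opp ∈ rend (tl pr ++ rest) := by
      rw [mem_rend]
      exact ⟨a, List.mem_append_left _ (by rw [hcons]; exact List.mem_cons_self ..), ha2⟩
    have hk' : (((a :: t') ++ rest).map Prod.fst).Nodup := by rw [← hcons]; exact hk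
    have hrem := master_pop t' rest a opp
      (by rw [← hcons]; exact hinv.2.1) ha2 ht2
      (fun e he => (hrest e he).2) hk'
    have hnd' : ((tl (pvUpd pr n 1 insym) ++ rest).map Prod.fst).Nodup := by
      rw [htl']
      refine List.Nodup.sublist (List.Sublist.map _ ?_) hk'
      exact (List.sublist_cons_self a t').append_right rest
    rw [if_pos hmem]
    refine ⟨?_, hpinv, hnd'⟩
    rw [htl', hcons, hrem]
    rfl
  · -- POP with an incoming closing bracket: the opener is stored
    subst hs1
    have hstored : opp = o := by
      rcases hso with ⟨ha_, hb_, h⟩ | ⟨ha_, hb_, h⟩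
      · exact absurd ha_ (by norm_num)
      · exact h
    subst hstored
    obtain ⟨a, t', hcons, ha2, ht2, htl', hpinv⟩ :=
      pair_pop hinv (-1) insym opp (Or.inr ⟨rfl, hblt, rfl⟩)
    have hmem : opp ∈ rend (tl pr ++ rest) := by
      rw [mem_rend]
      exact ⟨a, List.mem_append_left _ (by rw [hcons]; exact List.mem_cons_self ..), ha2⟩
    have hk' : (((a :: t') ++ rest).map Prod.fst).Nodup := by rw [← hcons]; exact hk
    have hrem := master_pop t' rest a opp
      (by rw [← hcons]; exact hinv.2.1) ha2 ht2
      (fun e he => (hrest e he).1) hk'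
    have hnd' : ((tl (pvUpd pr n (-1) insym) ++ rest).map Prod.fst).Nodup := by
      rw [htl']
      refine List.Nodup.sublist (List.Sublist.map _ ?_) hk'
      exact (List.sublist_cons_self a t').append_right rest
    rw [if_pos hmem]
    refine ⟨?_, hpinv, hnd'⟩
    rw [htl', hcons, hrem]
    rfl
  · -- PUSH: no opposite symbol stored; A appends
    have hnmem : opp ∉ rend (tl pr ++ rest) := by
      rw [mem_rend]
      rintro ⟨e, he, hv⟩
      rcases List.mem_append.1 he with hm | hm
      · have h5 := hinv.2.2.2.2 e hm
        rcases hcase with ⟨_, _, hb0⟩ | ⟨_, _, hb0⟩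
        · rcases hso with ⟨_, _, rfl⟩ | ⟨h1, _, _⟩
          · by_cases hbp : 0 < pr.b
            · rw [if_pos hbp] at h5; exact hoc (h5.symm.trans hv)
            · have hb1 : pr.b = 0 := by omega
              have hlen : (tl pr).length = 0 := by rw [hinv.2.2.2.1, hb1]; rfl
              rw [List.length_eq_zero_iff] at hlen
              rw [hlen] at hm; cases hm
          · omega
        · rcases hso with ⟨h1, _, _⟩ | ⟨_, _, rfl⟩
          · omega
          · by_cases hbp : 0 < pr.b
            · omega
            · rw [if_neg hbp] at h5; exact hoc (hv.symm.trans h5)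
      · rcases hso with ⟨_, _, rfl⟩ | ⟨_, _, rfl⟩
        · exact (hrest e hm).2 hv
        · exact (hrest e hm).1 hv
    obtain ⟨htl', hpinv⟩ := pair_push hinv s insym hcase
    have hball : ∀ e ∈ tl pr ++ rest, e.1 < n := by
      intro e he
      rcases List.mem_append.1 he with hm | hm
      · exact hinv.2.2.1 e hm
      · exact hbr e hm
    have hperm : ((tl pr ++ [(n, insym)]) ++ rest).Perm ((tl pr ++ rest) ++ [(n, insym)]) := by
      refine List.perm_iff_count.2 ?_
      intro e; simp [List.count_append, List.count_cons]; try omega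
    have hnd' : ((tl (pvUpd pr n s insym) ++ rest).map Prod.fst).Nodup := by
      rw [htl']
      refine (((hperm.map Prod.fst).nodup_iff).2 ?_)
      exact keys_snoc_nodup _ n insym hk hball
    rw [if_neg hnmem]
    refine ⟨?_, hpinv, hnd'⟩
    rw [htl', master_push (tl pr) rest n insym hk hball]

-- character-dispatch reductions for A's loop body
theorem stepA_lpar (salva : List String) : stepA salva '(' =
    if ")" ∈ salva then (PySem.List.remove? salva ")").getD salva else salva ++ ["("] := by
  simp [stepA]

theorem stepA_rpar (salva : List String) : stepA salva ')' =
    if "(" ∈ salva then (PySem.List.remove? salva "(").getD salva else salva ++ [")"] := by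
  simp [stepA]

theorem stepA_lbrk (salva : List String) : stepA salva '[' =
    if "]" ∈ salva then (PySem.List.remove? salva "]").getD salva else salva ++ ["["] := by
  simp [stepA]

theorem stepA_rbrk (salva : List String) : stepA salva ']' =
    if "[" ∈ salva then (PySem.List.remove? salva "[").getD salva else salva ++ ["]"] := by
  simp [stepA]

theorem stepA_lbrc (salva : List String) : stepA salva '{' =
    if "}" ∈ salva then (PySem.List.remove? salva "}").getD salva else salva ++ ["{"] := by
  simp [stepA]

theorem stepA_rbrc (salva : List String) : stepA salva '}' =
    if "{" ∈ salva then (PySem.List.remove? salva "{").getD salva else salva ++ ["}"] := by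
  simp [stepA]

theorem stepA_other (salva : List String) (ch : Char)
    (h1 : ch ≠ '(') (h2 : ch ≠ ')') (h3 : ch ≠ '[') (h4 : ch ≠ ']')
    (h5 : ch ≠ '{') (h6 : ch ≠ '}') : stepA salva ch = salva := by
  simp [stepA, h1, h2, h3, h4, h5, h6]

-- the main per-character step: A's loop body tracks B's, and the invariant survives
theorem step_main (n : Int) (st : PvPair × PvPair × PvPair) (ch : Char)
    (h : StInv n st) :
    stepA (rend (tails st)) ch = rend (tails (stepB st n ch)) ∧
      StInv (n + 1) (stepB st n ch) := by
  obtain ⟨hi0, hi1, hi2, hnd⟩ := h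
  have hb0 := hi0.2.2.1
  have hb1 := hi1.2.2.1
  have hb2 := hi2.2.2.1
  -- assoc/reorder permutations of the three tails
  have p0 : (tails st).Perm (tl st.1 ++ (tl st.2.1 ++ tl st.2.2)) := by
    unfold tails; rw [List.append_assoc]
  have p1 : (tails st).Perm (tl st.2.1 ++ (tl st.1 ++ tl st.2.2)) := by
    unfold tails; exact permAt1 _ _ _
  have p2 : (tails st).Perm (tl st.2.2 ++ (tl st.1 ++ tl st.2.1)) := by
    unfold tails; exact permAt2 _ _ _
  have s0 := snd_mem_pair hi0
  have s1 := snd_mem_pair hi1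
  have s2 := snd_mem_pair hi2
  by_cases hc1 : ch = '('
  · subst hc1
    have hB : stepB st n '(' = ⟨pvUpd st.1 n 1 "(", st.2.1, st.2.2⟩ := by simp [stepB]
    have hnd0 : ((tl st.1 ++ (tl st.2.1 ++ tl st.2.2)).map Prod.fst).Nodup :=
      ((p0.map Prod.fst).nodup_iff).1 hnd
    have hre : rend (tails st) = rend (tl st.1 ++ (tl st.2.1 ++ tl st.2.2)) := rend_congr p0 hnd0
    have hrest : ∀ e ∈ tl st.2.1 ++ tl st.2.2, e.2 ≠ "(" ∧ e.2 ≠ ")" := by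
      intro e he
      rcases List.mem_append.1 he with hm | hm
      · rcases s1 e hm with hs | hs <;> rw [hs] <;> exact ⟨by decide, by decide⟩
      · rcases s2 e hm with hs | hs <;> rw [hs] <;> exact ⟨by decide, by decide⟩
    have hbrest : ∀ e ∈ tl st.2.1 ++ tl st.2.2, e.1 < n := by
      intro e he
      rcases List.mem_append.1 he with hm | hm
      · exact hb1 e hm
      · exact hb2 e hm
    obtain ⟨heq, hpinv, hndnew⟩ := slot_step "(" ")" st.1 (tl st.2.1 ++ tl st.2.2) n 1 "(" ")"
      hi0 (by decide) (Or.inl ⟨rfl, rfl, rfl⟩) hrest hnd0 hbrest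
    have pnew : (tails ⟨pvUpd st.1 n 1 "(", st.2.1, st.2.2⟩).Perm
        (tl (pvUpd st.1 n 1 "(") ++ (tl st.2.1 ++ tl st.2.2)) := by
      unfold tails; rw [List.append_assoc]
    rw [hB, stepA_lpar, hre]
    refine ⟨?_, ?_⟩
    · rw [heq]
      exact (rend_congr pnew hndnew).symm
    · refine ⟨hpinv, pairinv_mono hi1, pairinv_mono hi2, ?_⟩
      exact ((pnew.map Prod.fst).nodup_iff).2 hndnew
  by_cases hc2 : ch = ')'
  · subst hc2
    have hB : stepB st n ')' = ⟨pvUpd st.1 n (-1) ")", st.2.1, st.2.2⟩ := by simp [stepB]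
    have hnd0 : ((tl st.1 ++ (tl st.2.1 ++ tl st.2.2)).map Prod.fst).Nodup :=
      ((p0.map Prod.fst).nodup_iff).1 hnd
    have hre : rend (tails st) = rend (tl st.1 ++ (tl st.2.1 ++ tl st.2.2)) := rend_congr p0 hnd0
    have hrest : ∀ e ∈ tl st.2.1 ++ tl st.2.2, e.2 ≠ "(" ∧ e.2 ≠ ")" := by
      intro e he
      rcases List.mem_append.1 he with hm | hm
      · rcases s1 e hm with hs | hs <;> rw [hs] <;> exact ⟨by decide, by decide⟩
      · rcases s2 e hm with hs | hs <;> rw [hs] <;> exact ⟨by decide, by decide⟩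
    have hbrest : ∀ e ∈ tl st.2.1 ++ tl st.2.2, e.1 < n := by
      intro e he
      rcases List.mem_append.1 he with hm | hm
      · exact hb1 e hm
      · exact hb2 e hm
    obtain ⟨heq, hpinv, hndnew⟩ := slot_step "(" ")" st.1 (tl st.2.1 ++ tl st.2.2) n (-1) ")" "("
      hi0 (by decide) (Or.inr ⟨rfl, rfl, rfl⟩) hrest hnd0 hbrest
    have pnew : (tails ⟨pvUpd st.1 n (-1) ")", st.2.1, st.2.2⟩).Perm
        (tl (pvUpd st.1 n (-1) ")") ++ (tl st.2.1 ++ tl st.2.2)) := by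
      unfold tails; rw [List.append_assoc]
    rw [hB, stepA_rpar, hre]
    refine ⟨?_, ?_⟩
    · rw [heq]
      exact (rend_congr pnew hndnew).symm
    · refine ⟨hpinv, pairinv_mono hi1, pairinv_mono hi2, ?_⟩
      exact ((pnew.map Prod.fst).nodup_iff).2 hndnew
  by_cases hc3 : ch = '['
  · subst hc3
    have hB : stepB st n '[' = ⟨st.1, pvUpd st.2.1 n 1 "[", st.2.2⟩ := by simp [stepB]
    have hnd0 : ((tl st.2.1 ++ (tl st.1 ++ tl st.2.2)).map Prod.fst).Nodup :=
      ((p1.map Prod.fst).nodup_iff).1 hnd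
    have hre : rend (tails st) = rend (tl st.2.1 ++ (tl st.1 ++ tl st.2.2)) := rend_congr p1 hnd0
    have hrest : ∀ e ∈ tl st.1 ++ tl st.2.2, e.2 ≠ "[" ∧ e.2 ≠ "]" := by
      intro e he
      rcases List.mem_append.1 he with hm | hm
      · rcases s0 e hm with hs | hs <;> rw [hs] <;> exact ⟨by decide, by decide⟩
      · rcases s2 e hm with hs | hs <;> rw [hs] <;> exact ⟨by decide, by decide⟩
    have hbrest : ∀ e ∈ tl st.1 ++ tl st.2.2, e.1 < n := by
      intro e he
      rcases List.mem_append.1 he with hm | hm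
      · exact hb0 e hm
      · exact hb2 e hm
    obtain ⟨heq, hpinv, hndnew⟩ := slot_step "[" "]" st.2.1 (tl st.1 ++ tl st.2.2) n 1 "[" "]"
      hi1 (by decide) (Or.inl ⟨rfl, rfl, rfl⟩) hrest hnd0 hbrest
    have pnew : (tails ⟨st.1, pvUpd st.2.1 n 1 "[", st.2.2⟩).Perm
        (tl (pvUpd st.2.1 n 1 "[") ++ (tl st.1 ++ tl st.2.2)) := by
      unfold tails; exact permAt1 _ _ _
    rw [hB, stepA_lbrk, hre]
    refine ⟨?_, ?_⟩
    · rw [heq]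
      exact (rend_congr pnew hndnew).symm
    · refine ⟨pairinv_mono hi0, hpinv, pairinv_mono hi2, ?_⟩
      exact ((pnew.map Prod.fst).nodup_iff).2 hndnew
  by_cases hc4 : ch = ']'
  · subst hc4
    have hB : stepB st n ']' = ⟨st.1, pvUpd st.2.1 n (-1) "]", st.2.2⟩ := by simp [stepB]
    have hnd0 : ((tl st.2.1 ++ (tl st.1 ++ tl st.2.2)).map Prod.fst).Nodup :=
      ((p1.map Prod.fst).nodup_iff).1 hnd
    have hre : rend (tails st) = rend (tl st.2.1 ++ (tl st.1 ++ tl st.2.2)) := rend_congr p1 hnd0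
    have hrest : ∀ e ∈ tl st.1 ++ tl st.2.2, e.2 ≠ "[" ∧ e.2 ≠ "]" := by
      intro e he
      rcases List.mem_append.1 he with hm | hm
      · rcases s0 e hm with hs | hs <;> rw [hs] <;> exact ⟨by decide, by decide⟩
      · rcases s2 e hm with hs | hs <;> rw [hs] <;> exact ⟨by decide, by decide⟩
    have hbrest : ∀ e ∈ tl st.1 ++ tl st.2.2, e.1 < n := by
      intro e he
      rcases List.mem_append.1 he with hm | hm
      · exact hb0 e hm
      · exact hb2 e hm
    obtain ⟨heq, hpinv, hndnew⟩ := slot_step "[" "]" st.2.1 (tl st.1 ++ tl st.2.2) n (-1) "]" "["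
      hi1 (by decide) (Or.inr ⟨rfl, rfl, rfl⟩) hrest hnd0 hbrest
    have pnew : (tails ⟨st.1, pvUpd st.2.1 n (-1) "]", st.2.2⟩).Perm
        (tl (pvUpd st.2.1 n (-1) "]") ++ (tl st.1 ++ tl st.2.2)) := by
      unfold tails; exact permAt1 _ _ _
    rw [hB, stepA_rbrk, hre]
    refine ⟨?_, ?_⟩
    · rw [heq]
      exact (rend_congr pnew hndnew).symm
    · refine ⟨pairinv_mono hi0, hpinv, pairinv_mono hi2, ?_⟩
      exact ((pnew.map Prod.fst).nodup_iff).2 hndnew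
  by_cases hc5 : ch = '{'
  · subst hc5
    have hB : stepB st n '{' = ⟨st.1, st.2.1, pvUpd st.2.2 n 1 "{"⟩ := by simp [stepB]
    have hnd0 : ((tl st.2.2 ++ (tl st.1 ++ tl st.2.1)).map Prod.fst).Nodup :=
      ((p2.map Prod.fst).nodup_iff).1 hnd
    have hre : rend (tails st) = rend (tl st.2.2 ++ (tl st.1 ++ tl st.2.1)) := rend_congr p2 hnd0
    have hrest : ∀ e ∈ tl st.1 ++ tl st.2.1, e.2 ≠ "{" ∧ e.2 ≠ "}" := by
      intro e he
      rcases List.mem_append.1 he with hm | hm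
      · rcases s0 e hm with hs | hs <;> rw [hs] <;> exact ⟨by decide, by decide⟩
      · rcases s1 e hm with hs | hs <;> rw [hs] <;> exact ⟨by decide, by decide⟩
    have hbrest : ∀ e ∈ tl st.1 ++ tl st.2.1, e.1 < n := by
      intro e he
      rcases List.mem_append.1 he with hm | hm
      · exact hb0 e hm
      · exact hb1 e hm
    obtain ⟨heq, hpinv, hndnew⟩ := slot_step "{" "}" st.2.2 (tl st.1 ++ tl st.2.1) n 1 "{" "}"
      hi2 (by decide) (Or.inl ⟨rfl, rfl, rfl⟩) hrest hnd0 hbrest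
    have pnew : (tails ⟨st.1, st.2.1, pvUpd st.2.2 n 1 "{"⟩).Perm
        (tl (pvUpd st.2.2 n 1 "{") ++ (tl st.1 ++ tl st.2.1)) := by
      unfold tails; exact permAt2 _ _ _
    rw [hB, stepA_lbrc, hre]
    refine ⟨?_, ?_⟩
    · rw [heq]
      exact (rend_congr pnew hndnew).symm
    · refine ⟨pairinv_mono hi0, pairinv_mono hi1, hpinv, ?_⟩
      exact ((pnew.map Prod.fst).nodup_iff).2 hndnew
  by_cases hc6 : ch = '}'
  · subst hc6
    have hB : stepB st n '}' = ⟨st.1, st.2.1, pvUpd st.2.2 n (-1) "}"⟩ := by simp [stepB]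
    have hnd0 : ((tl st.2.2 ++ (tl st.1 ++ tl st.2.1)).map Prod.fst).Nodup :=
      ((p2.map Prod.fst).nodup_iff).1 hnd
    have hre : rend (tails st) = rend (tl st.2.2 ++ (tl st.1 ++ tl st.2.1)) := rend_congr p2 hnd0
    have hrest : ∀ e ∈ tl st.1 ++ tl st.2.1, e.2 ≠ "{" ∧ e.2 ≠ "}" := by
      intro e he
      rcases List.mem_append.1 he with hm | hm
      · rcases s0 e hm with hs | hs <;> rw [hs] <;> exact ⟨by decide, by decide⟩
      · rcases s1 e hm with hs | hs <;> rw [hs] <;> exact ⟨by decide, by decide⟩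
    have hbrest : ∀ e ∈ tl st.1 ++ tl st.2.1, e.1 < n := by
      intro e he
      rcases List.mem_append.1 he with hm | hm
      · exact hb0 e hm
      · exact hb1 e hm
    obtain ⟨heq, hpinv, hndnew⟩ := slot_step "{" "}" st.2.2 (tl st.1 ++ tl st.2.1) n (-1) "}" "{"
      hi2 (by decide) (Or.inr ⟨rfl, rfl, rfl⟩) hrest hnd0 hbrest
    have pnew : (tails ⟨st.1, st.2.1, pvUpd st.2.2 n (-1) "}"⟩).Perm
        (tl (pvUpd st.2.2 n (-1) "}") ++ (tl st.1 ++ tl st.2.1)) := by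
      unfold tails; exact permAt2 _ _ _
    rw [hB, stepA_rbrc, hre]
    refine ⟨?_, ?_⟩
    · rw [heq]
      exact (rend_congr pnew hndnew).symm
    · refine ⟨pairinv_mono hi0, pairinv_mono hi1, hpinv, ?_⟩
      exact ((pnew.map Prod.fst).nodup_iff).2 hndnew
  · have hA := stepA_other (rend (tails st)) ch hc1 hc2 hc3 hc4 hc5 hc6
    have hB : stepB st n ch = st := by
      simp [stepB, hc1, hc2, hc3, hc4, hc5, hc6]
    rw [hA, hB]
    exact ⟨rfl, pairinv_mono hi0, pairinv_mono hi1, pairinv_mono hi2, hnd⟩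

theorem fold_main (l : List Char) : ∀ (n : Int) (st : PvPair × PvPair × PvPair), StInv n st →
    l.foldl stepA (rend (tails st)) =
      rend (tails ((PySem.List.enumerate l n).foldl (fun s pc => stepB s pc.1 pc.2) st)) := by
  induction l with
  | nil => intro n st _h; simp [PySem.List.enumerate_nil]
  | cons c l ih =>
    intro n st h
    rw [PySem.List.enumerate_cons]
    simp only [List.foldl_cons]
    obtain ⟨heq, hinv⟩ := step_main n st c h
    rw [heq]
    exact ih (n + 1) _ hinv

-- ===== VERDICT (by name: the statement is the Claim_ definition above) =====
theorem verificacao_spec : Claim_equal_verificacao := by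
  intro entrada _hdom
  show verificacao entrada = verificacao_alt entrada
  have h0 : StInv 0 ((⟨0, [], 0⟩ : PvPair), (⟨0, [], 0⟩ : PvPair), (⟨0, [], 0⟩ : PvPair)) := by
    unfold StInv PairInv tails tl
    simp
  have hmain := fold_main entrada.toList 0 _ h0
  have hinit : rend (tails ((⟨0, [], 0⟩ : PvPair), (⟨0, [], 0⟩ : PvPair), (⟨0, [], 0⟩ : PvPair))) = [] := rfl
  rw [hinit] at hmain
  exact hmain
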